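-- pv_equiv track=rewrite | github.com/Morgan-Sinclaire/CCI | ch16.py | check_sol
-- ===== SOURCE A (Python) =====
-- from collections import Counter,defaultdict
--
-- def check_sol(pattern, value, sol):
--     """
--     Given a pattern, value, and proposed solution for the value to
--     match the pattern, verify this solution. This is given as a dict
--     of the form e.g. {'b': 3, 'a': 2}, where these represent the number
--     of characters in that segment of the pattern.
--     """
--     # create a list of the length of the pattern, where each number is
--     # the length of the corresponding segment in the value
--     cnts = [sol[c] for c in pattern]
--
--     # create a list of words from value that should map to the pattern
--     words = []
--     i = 0
--     for count in cnts:
--         words.append(value[i:i+count])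
--         i += count
--
--     # create a dictionary indicating the set of substrings mapping to
--     # each element of the pattern
--     d = defaultdict()
--     for i in range(len(pattern)):
--         d[pattern[i]] = set()
--     for i in range(len(pattern)):
--         d[pattern[i]].add(words[i])
--
--     # there should not be different substrings for a single element
--     for s in d.values():
--         if len(s) > 1:
--             return False
--     return True
-- ===== SOURCE B (Python) =====
-- def check_sol(pattern, value, sol):
--     # compute all segment lengths first (same KeyError behaviour as A)
--     cnts = [sol[c] for c in pattern]
--     i = 0
--     seen = {}
--     for c, count in zip(pattern, cnts):
--         w = value[i:i+count]
--         i += count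
--         if c in seen:
--             if seen[c] != w:
--                 return False
--         else:
--             seen[c] = w
--     return True
-- ===== Notes on version B (the rewrite author's own statement) =====
-- stated objective: simpler
-- what changed: Replaces A's three passes (build words list, build a char->set-of-substrings dict, scan the sets' sizes) with one early-exiting pass that keeps only the first substring seen per pattern char and compares each new segment against it.
import Mathlib
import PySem

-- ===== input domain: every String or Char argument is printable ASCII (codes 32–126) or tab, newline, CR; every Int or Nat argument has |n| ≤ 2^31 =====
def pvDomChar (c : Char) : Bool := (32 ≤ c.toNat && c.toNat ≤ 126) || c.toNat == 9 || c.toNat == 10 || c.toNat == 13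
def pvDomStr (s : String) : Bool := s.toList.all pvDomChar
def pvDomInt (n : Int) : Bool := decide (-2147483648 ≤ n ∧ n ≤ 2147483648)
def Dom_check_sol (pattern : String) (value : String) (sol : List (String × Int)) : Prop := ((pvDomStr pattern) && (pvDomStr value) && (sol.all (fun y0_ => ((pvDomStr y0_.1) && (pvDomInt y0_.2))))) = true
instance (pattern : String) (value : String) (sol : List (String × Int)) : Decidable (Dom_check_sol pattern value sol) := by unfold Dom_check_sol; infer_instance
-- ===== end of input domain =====

-- B replaces A's three passes (words list, char→set-of-substrings dict, set-size scan) with one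
-- early-exiting pass keeping the first substring per pattern char (objective: simpler).

-- value[i:i+count] — the slice primitive both programs use for a segment
def pvWordAt (value : String) (i cnt : Int) : String :=
  String.ofList (PySem.List.slice value.toList (some i) (some (i + cnt)))

-- ===== PORT A =====
def check_sol (pattern : String) (value : String) (sol : List (String × Int)) : Bool :=
  -- cnts = [sol[c] for c in pattern]  (Pre_ guarantees every key is present)
  let cnts := pattern.toList.map (fun c => (PySem.Dict.mk sol).getD (String.ofList [c]) 0)
  -- words = []; i = 0; for count in cnts: words.append(value[i:i+count]); i += count
  let st := cnts.foldl (fun (st : List String × Int) count =>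
      (st.1 ++ [pvWordAt value st.2 count], st.2 + count)) ([], 0)
  let words := st.1
  -- d = defaultdict(); for i in range(len(pattern)): d[pattern[i]] = set()
  let d1 : PySem.Dict Char (PySem.Set String) :=
    pattern.toList.foldl (fun d c => d.insert c PySem.Set.empty) PySem.Dict.empty
  -- for i in range(len(pattern)): d[pattern[i]].add(words[i])   (paired traversal of pattern/words)
  let d2 := (pattern.toList.zip words).foldl
      (fun d p => d.modify p.1 PySem.Set.empty (fun s => PySem.Set.add s p.2)) d1
  -- for s in d.values(): if len(s) > 1: return False;  return True
  d2.values.all (fun s => !decide (PySem.Set.len s > 1))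

-- ===== PORT B =====
-- for c, count in zip(pattern, cnts): w = value[i:i+count]; i += count; check/record seen[c]
def pvGoB (value : String) : List (Char × Int) → Int → PySem.Dict Char String → Bool
  | [], _, _ => true
  | (c, count) :: rest, i, seen =>
    let w := pvWordAt value i count
    match seen.get? c with
    | some w0 => if w0 ≠ w then false else pvGoB value rest (i + count) seen
    | none => pvGoB value rest (i + count) (seen.insert c w)

def check_sol_alt (pattern : String) (value : String) (sol : List (String × Int)) : Bool :=
  let cnts := pattern.toList.map (fun c => (PySem.Dict.mk sol).getD (String.ofList [c]) 0)
  pvGoB value (pattern.toList.zip cnts) 0 PySem.Dict.empty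

-- ===== PRECONDITION & SPEC =====
-- Pre_ excludes exactly the inputs where Python A raises KeyError: some pattern char missing from sol.
def Pre_check_sol (pattern : String) (value : String) (sol : List (String × Int)) : Prop :=
  (pattern.toList.all (fun c => ((PySem.Dict.mk sol).get? (String.ofList [c])).isSome)) = true
instance (pattern : String) (value : String) (sol : List (String × Int)) : Decidable (Pre_check_sol pattern value sol) := by unfold Pre_check_sol; infer_instance

def pvWitness_check_sol : String × String × (List (String × Int)) :=
  ("aba", "xyx", [("a", 1), ("b", 1)])

def Spec_check_sol (pattern : String) (value : String) (sol : List (String × Int)) (out : Bool) : Prop := out = check_sol_alt pattern value sol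
instance (pattern : String) (value : String) (sol : List (String × Int)) (out : Bool) : Decidable (Spec_check_sol pattern value sol out) := by unfold Spec_check_sol; infer_instance

-- ===== CLAIM (what is proved, stated in full; the proofs are below) =====
def Claim_equal_check_sol : Prop := ∀ (pattern : String) (value : String) (sol : List (String × Int)), Dom_check_sol pattern value sol → Pre_check_sol pattern value sol → Spec_check_sol pattern value sol (check_sol pattern value sol)

-- ===== LEMMAS AND PROOFS =====

-- the list of segments produced from counts, starting at offset i
def pvWordsFrom (value : String) : List Int → Int → List String
  | [], _ => []
  | cnt :: rest, i => pvWordAt value i cnt :: pvWordsFrom value rest (i + cnt)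

-- the (char, segment) pairs B walks
def pvPairsOf (value : String) : List (Char × Int) → Int → List (Char × String)
  | [], _ => []
  | (c, cnt) :: rest, i => (c, pvWordAt value i cnt) :: pvPairsOf value rest (i + cnt)

-- global consistency: equal pattern chars carry equal segments
def pvQ (ps : List (Char × String)) : Prop :=
  ∀ p ∈ ps, ∀ q ∈ ps, p.1 = q.1 → p.2 = q.2

lemma pvQ_cons (p : Char × String) (ps : List (Char × String)) :
    pvQ (p :: ps) ↔ (∀ q ∈ ps, p.1 = q.1 → p.2 = q.2) ∧ pvQ ps := by
  constructor
  · intro h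
    exact ⟨fun q hq hpq => h p (by simp) q (List.mem_cons_of_mem _ hq) hpq,
           fun a ha b hb hab => h a (List.mem_cons_of_mem _ ha) b (List.mem_cons_of_mem _ hb) hab⟩
  · rintro ⟨h1, h2⟩ a ha b hb hab
    rcases List.mem_cons.1 ha with ha' | ha' <;> rcases List.mem_cons.1 hb with hb' | hb'
    · rw [ha', hb']
    · rw [ha'] at hab ⊢; exact h1 b hb' hab
    · rw [hb'] at hab ⊢; exact (h1 a ha' hab.symm).symm
    · exact h2 a ha' b hb' hab

lemma pvGoB_iff (value : String) (l : List (Char × Int)) (i : Int) (seen : PySem.Dict Char String) :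
    pvGoB value l i seen = true ↔
      ((∀ p ∈ pvPairsOf value l i, ∀ w0, seen.get? p.1 = some w0 → p.2 = w0) ∧
        pvQ (pvPairsOf value l i)) := by
  induction l generalizing i seen with
  | nil => simp [pvGoB, pvPairsOf, pvQ]
  | cons hd rest ih =>
    obtain ⟨c, cnt⟩ := hd
    rw [pvPairsOf]
    simp only [pvGoB]
    split
    · rename_i w0 hg
      by_cases hww : w0 = pvWordAt value i cnt
      · rw [hww] at hg
        rw [hww, if_neg (fun h => h rfl), ih]
        constructor
        · rintro ⟨h1, h2⟩
          refine ⟨List.forall_mem_cons.mpr ⟨?_, h1⟩, (pvQ_cons _ _).mpr ⟨?_, h2⟩⟩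
          · intro v hv
            rw [hg] at hv
            cases hv
            rfl
          · intro q hq hcq
            exact (h1 q hq _ (by rw [← hcq]; exact hg)).symm
        · rintro ⟨h1, h2⟩
          exact ⟨(List.forall_mem_cons.mp h1).2, ((pvQ_cons _ _).mp h2).2⟩
      · rw [if_pos hww]
        simp only [Bool.false_eq_true, false_iff]
        rintro ⟨h1, -⟩
        exact hww ((h1 (c, pvWordAt value i cnt) (by simp) w0 hg)).symm
    · rename_i hg
      rw [ih]
      constructor
      · rintro ⟨h1, h2⟩
        refine ⟨List.forall_mem_cons.mpr ⟨?_, ?_⟩, (pvQ_cons _ _).mpr ⟨?_, h2⟩⟩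
        · intro v hv
          rw [hg] at hv
          cases hv
        · intro p hp v hv
          by_cases hpc : p.1 = c
          · rw [hpc, hg] at hv
            cases hv
          · exact h1 p hp v (by rw [PySem.Dict.get?_insert, if_neg hpc]; exact hv)
        · intro q hq hcq
          exact (h1 q hq _ (by rw [PySem.Dict.get?_insert, if_pos hcq.symm])).symm
      · rintro ⟨h1, h2⟩
        have h1' := List.forall_mem_cons.mp h1
        have h2' := (pvQ_cons _ _).mp h2
        refine ⟨?_, h2'.2⟩
        intro p hp v hv
        rw [PySem.Dict.get?_insert] at hv
        by_cases hpc : p.1 = c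
        · rw [if_pos hpc] at hv
          cases hv
          exact (h2'.1 p hp hpc.symm).symm
        · rw [if_neg hpc] at hv
          exact h1'.2 p hp v hv

lemma pvFoldlWords (value : String) (cnts : List Int) (acc : List String) (i : Int) :
    (cnts.foldl (fun (st : List String × Int) count =>
      (st.1 ++ [pvWordAt value st.2 count], st.2 + count)) (acc, i)).1
      = acc ++ pvWordsFrom value cnts i := by
  induction cnts generalizing acc i with
  | nil => simp [pvWordsFrom]
  | cons c rest ih => simp [pvWordsFrom, List.foldl_cons, ih, List.append_assoc]

lemma pvZipWords (value : String) (chars : List Char) (cnts : List Int) (i : Int) :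
    chars.zip (pvWordsFrom value cnts i) = pvPairsOf value (chars.zip cnts) i := by
  induction chars generalizing cnts i with
  | nil => simp [pvPairsOf]
  | cons c cs ih =>
    cases cnts with
    | nil => simp [pvWordsFrom, pvPairsOf]
    | cons n ns => simp [pvWordsFrom, pvPairsOf, ih]

lemma pvLenWordsFrom (value : String) (cnts : List Int) (i : Int) :
    (pvWordsFrom value cnts i).length = cnts.length := by
  induction cnts generalizing i with
  | nil => rfl
  | cons c rest ih => simp [pvWordsFrom, ih]

lemma pvGetD_d1 (chars : List Char) (c : Char) (d : PySem.Dict Char (PySem.Set String))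
    (h : ∀ x, d.getD x PySem.Set.empty = PySem.Set.empty) :
    (chars.foldl (fun d c => d.insert c PySem.Set.empty) d).getD c PySem.Set.empty
      = PySem.Set.empty := by
  induction chars generalizing d with
  | nil => exact h c
  | cons x xs ih =>
    rw [List.foldl_cons]
    refine ih _ (fun y => ?_)
    rw [PySem.Dict.getD_insert]
    split <;> [rfl; exact h y]

lemma pvGetD_d2 (l : List (Char × String)) (d : PySem.Dict Char (PySem.Set String)) (c : Char) :
    (l.foldl (fun d p => d.modify p.1 PySem.Set.empty (fun s => PySem.Set.add s p.2)) d).getD c PySem.Set.empty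
      = PySem.Set.update (d.getD c PySem.Set.empty) ((l.filter (fun p => p.1 == c)).map (·.2)) := by
  induction l generalizing d with
  | nil => simp [PySem.Set.update]
  | cons p l ih =>
    rw [List.foldl_cons, ih, PySem.Dict.getD_modify]
    by_cases hc : c = p.1
    · subst hc
      simp [PySem.Set.update_cons]
    · have hb : (p.1 == c) = false := by
        simp only [beq_eq_false_iff_ne]
        exact fun h => hc h.symm
      simp [hc, hb]

lemma pvOfListLen_le_one (l : List String) :
    (PySem.Set.ofList l).length ≤ 1 ↔ ∀ a ∈ l, ∀ b ∈ l, a = b := by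
  constructor
  · intro h a ha b hb
    have ha' := (PySem.Set.mem_ofList l a).mpr ha
    have hb' := (PySem.Set.mem_ofList l b).mpr hb
    cases hL : PySem.Set.ofList l with
    | nil => rw [hL] at ha'; simp at ha'
    | cons x xs =>
      cases xs with
      | nil =>
        rw [hL] at ha' hb'
        simp at ha' hb'
        rw [ha', hb']
      | cons y rest => rw [hL] at h; simp at h
  · intro h
    by_contra hlen
    push_neg at hlen
    cases hL : PySem.Set.ofList l with
    | nil => rw [hL] at hlen; simp at hlen
    | cons x xs =>
      cases xs with
      | nil => rw [hL] at hlen; simp at hlen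
      | cons y rest =>
        have hnd := PySem.Set.nodup_ofList l
        rw [hL] at hnd
        have hxy : x ≠ y := by
          rw [List.nodup_cons] at hnd
          exact fun he => hnd.1 (he ▸ List.mem_cons_self)
        have hx : x ∈ l := (PySem.Set.mem_ofList l _).mp (by rw [hL]; simp)
        have hy : y ∈ l := (PySem.Set.mem_ofList l _).mp (by rw [hL]; simp)
        exact hxy (h x hx y hy)

lemma pvLenLe (s : PySem.Set String) :
    ((!decide (PySem.Set.len s > 1)) = true) ↔ s.length ≤ 1 := by
  simp [PySem.Set.len]

lemma pvA_values (chars : List Char) (l : List (Char × String))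
    (hfst : l.map Prod.fst = chars) :
    ((l.foldl (fun d p => d.modify p.1 PySem.Set.empty (fun s => PySem.Set.add s p.2))
        (chars.foldl (fun d c => d.insert c PySem.Set.empty) PySem.Dict.empty)).values.all
      (fun s => !decide (PySem.Set.len s > 1))) = true ↔ pvQ l := by
  set d1 := chars.foldl (fun d c => d.insert c PySem.Set.empty) PySem.Dict.empty with hd1
  set d2 := l.foldl (fun d p => d.modify p.1 PySem.Set.empty (fun s => PySem.Set.add s p.2)) d1 with hd2
  have hk1 : d1.keys = PySem.Set.ofList chars := by
    rw [hd1, PySem.Dict.keys_foldl_insert chars (fun _ _ => PySem.Set.empty) PySem.Dict.empty,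
        PySem.Dict.keys_empty, PySem.Set.update_nil_left]
  have hknd : d2.keys.Nodup := by
    rw [hd2]
    exact PySem.Dict.nodup_keys_foldl_modify_key l Prod.fst PySem.Set.empty
      (fun _ p s => PySem.Set.add s p.2) d1 (by rw [hk1]; exact PySem.Set.nodup_ofList chars)
  have hmem : ∀ c, c ∈ d2.keys ↔ c ∈ chars := by
    intro c
    rw [hd2, PySem.Dict.keys_foldl_modify_key l Prod.fst PySem.Set.empty
      (fun _ p s => PySem.Set.add s p.2) d1, hk1, hfst, PySem.Set.mem_update]
    simp [PySem.Set.mem_ofList]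
  have hval : ∀ c, d2.getD c PySem.Set.empty
      = PySem.Set.ofList ((l.filter (fun p => p.1 == c)).map (·.2)) := by
    intro c
    rw [hd2, pvGetD_d2, hd1, pvGetD_d1 chars c PySem.Dict.empty
      (fun x => PySem.Dict.getD_empty x PySem.Set.empty), PySem.Set.update_empty]
  rw [PySem.Dict.values_eq_map_keys d2 hknd PySem.Set.empty, List.all_map, List.all_eq_true]
  constructor
  · intro h p hp q hq hpq
    have hc : p.1 ∈ chars := by
      rw [← hfst]
      exact List.mem_map_of_mem hp
    have h1 := h p.1 ((hmem p.1).mpr hc)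
    simp only [Function.comp_apply, pvLenLe, hval, pvOfListLen_le_one] at h1
    have key := h1
    refine key p.2 ?_ q.2 ?_
    · exact List.mem_map_of_mem (List.mem_filter.mpr ⟨hp, by simp⟩)
    · exact List.mem_map_of_mem (List.mem_filter.mpr ⟨hq, by simp [← hpq]⟩)
  · intro h c hc
    simp only [Function.comp_apply, pvLenLe, hval, pvOfListLen_le_one]
    intro a ha b hb
    obtain ⟨p, hpf, rfl⟩ := List.mem_map.mp ha
    obtain ⟨q, hqf, rfl⟩ := List.mem_map.mp hb
    obtain ⟨hp, hpc⟩ := List.mem_filter.mp hpf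
    obtain ⟨hq, hqc⟩ := List.mem_filter.mp hqf
    exact h p hp q hq (by rw [beq_iff_eq] at hpc hqc; rw [hpc, hqc])

lemma pvA_iff (pattern value : String) (sol : List (String × Int)) :
    check_sol pattern value sol = true ↔
      pvQ (pvPairsOf value
        (pattern.toList.zip (pattern.toList.map (fun c => (PySem.Dict.mk sol).getD (String.ofList [c]) 0))) 0) := by
  simp only [check_sol]
  rw [pvFoldlWords, List.nil_append,
      ← pvZipWords value pattern.toList
        (pattern.toList.map (fun c => (PySem.Dict.mk sol).getD (String.ofList [c]) 0)) 0]
  exact pvA_values pattern.toList _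
    (List.map_fst_zip (le_of_eq (by rw [pvLenWordsFrom, List.length_map])))

lemma pvB_iff (pattern value : String) (sol : List (String × Int)) :
    check_sol_alt pattern value sol = true ↔
      pvQ (pvPairsOf value
        (pattern.toList.zip (pattern.toList.map (fun c => (PySem.Dict.mk sol).getD (String.ofList [c]) 0))) 0) := by
  simp only [check_sol_alt]
  rw [pvGoB_iff]
  simp [PySem.Dict.get?_empty]

-- ===== VERDICT (by name: the statement is the Claim_ definition above) =====
theorem check_sol_spec : Claim_equal_check_sol := by
  intro pattern value sol _hdom _hpre
  unfold Spec_check_sol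
  rw [Bool.eq_iff_iff, pvA_iff, pvB_iff]
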